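-- pv_equiv track=rewrite | github.com/kuznetsovvj/education | algorithms/codeforces/1569a.py | check
-- ===== SOURCE A (Python) =====
-- def check(w):
--     if len(w) == 1:
--         return "-1 -1"
--     for i in range(1, len(w)):
--         a = (w[i] == 'a') or (w[i-1] == 'a')
--         b = (w[i] == 'b') or (w[i-1] == 'b')
--         if a and b:
--             return f"{i} {i+1}"
--     return "-1 -1"
-- ===== SOURCE B (Python) =====
-- def check(w):
--     ia = w.find('ab')
--     ib = w.find('ba')
--     if ia == -1:
--         p = ib
--     elif ib == -1:
--         p = ia
--     else:
--         p = min(ia, ib)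
--     return "-1 -1" if p == -1 else f"{p + 1} {p + 2}"
-- ===== Notes on version B (the rewrite author's own statement) =====
-- stated objective: idiomatic
-- what changed: Replaces the explicit index loop over adjacent character pairs with two str.find calls for the only qualifying substrings 'ab' and 'ba', taking the earlier hit; loop-free and handles short strings without a special case.
import Mathlib
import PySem

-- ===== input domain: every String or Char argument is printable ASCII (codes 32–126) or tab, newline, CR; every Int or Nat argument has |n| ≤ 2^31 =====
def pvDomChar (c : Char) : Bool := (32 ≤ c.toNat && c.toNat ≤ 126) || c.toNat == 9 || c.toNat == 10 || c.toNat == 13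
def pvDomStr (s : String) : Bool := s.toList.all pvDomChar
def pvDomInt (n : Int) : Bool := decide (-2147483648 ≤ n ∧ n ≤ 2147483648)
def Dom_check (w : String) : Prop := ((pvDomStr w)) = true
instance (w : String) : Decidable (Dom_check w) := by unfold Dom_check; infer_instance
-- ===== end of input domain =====

-- B replaces A's index loop over adjacent pairs by two substring finds ('ab'/'ba') and takes the earlier hit (idiomatic, loop-free).

-- ===== PORT A =====
-- the for-loop of A: index i runs from 1 while i < len(w), early return on a hit
def checkGo (cs : List Char) (i : Nat) : String :=
  if h : i < cs.length then
    let a := (cs[i] == 'a') || (cs[i-1]'(Nat.lt_of_le_of_lt (Nat.sub_le i 1) h) == 'a')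
    let b := (cs[i] == 'b') || (cs[i-1]'(Nat.lt_of_le_of_lt (Nat.sub_le i 1) h) == 'b')
    if a && b then PySem.Int.toStr (i : Int) ++ " " ++ PySem.Int.toStr ((i : Int) + 1)
    else checkGo cs (i+1)
  else "-1 -1"
termination_by cs.length - i
decreasing_by omega

def check (w : String) : String :=
  if PySem.Str.len w = 1 then "-1 -1"
  else checkGo w.toList 1

-- ===== PORT B =====
def check_alt (w : String) : String :=
  let ia := PySem.Str.find w "ab"
  let ib := PySem.Str.find w "ba"
  let p := if ia = -1 then ib else if ib = -1 then ia else min ia ib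
  if p = -1 then "-1 -1"
  else PySem.Int.toStr (p + 1) ++ " " ++ PySem.Int.toStr (p + 2)

-- ===== PRECONDITION & SPEC =====
def Spec_check (w : String) (out : String) : Prop := out = check_alt w
instance (w : String) (out : String) : Decidable (Spec_check w out) := by unfold Spec_check; infer_instance

-- ===== CLAIM (what is proved, stated in full; the proofs are below) =====
def Claim_equal_check : Prop := ∀ (w : String), Dom_check w → Spec_check w (check w)

-- ===== LEMMAS AND PROOFS =====

-- the pair (cs[p], cs[p+1]) consists of one 'a' and one 'b'
def pairAt (cs : List Char) (p : Nat) : Prop :=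
  (cs[p]? = some 'a' ∧ cs[p+1]? = some 'b') ∨ (cs[p]? = some 'b' ∧ cs[p+1]? = some 'a')

theorem pair_prefix (x y : Char) (l : List Char) :
    [x, y] <+: l ↔ l[0]? = some x ∧ l[1]? = some y := by
  match l with
  | [] => simp
  | [a] => simp [List.cons_prefix_cons]
  | a :: b :: t => simp [List.cons_prefix_cons, eq_comm]

theorem prefix2_iff (x y : Char) (cs : List Char) (p : Nat) :
    [x, y] <+: cs.drop p ↔ (cs[p]? = some x ∧ cs[p+1]? = some y) := by
  rw [pair_prefix]
  simp [List.getElem?_drop]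

-- A's test at loop index i is exactly pairAt at position i-1
theorem test_iff (cs : List Char) (i : Nat) (h : i < cs.length) (hi : 1 ≤ i) :
    (((cs[i] == 'a') || (cs[i-1]'(Nat.lt_of_le_of_lt (Nat.sub_le i 1) h) == 'a')) &&
     ((cs[i] == 'b') || (cs[i-1]'(Nat.lt_of_le_of_lt (Nat.sub_le i 1) h) == 'b'))) = true
      ↔ pairAt cs (i-1) := by
  have h1 : i - 1 < cs.length := Nat.lt_of_le_of_lt (Nat.sub_le i 1) h
  have h2 : i - 1 + 1 = i := by omega
  unfold pairAt
  rw [h2, List.getElem?_eq_getElem h1, List.getElem?_eq_getElem h]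
  simp only [Bool.and_eq_true, Bool.or_eq_true, beq_iff_eq, Option.some_inj]
  constructor
  · rintro ⟨(ha | ha), (hb | hb)⟩
    · exact absurd (ha ▸ hb) (by decide)
    · exact Or.inr ⟨hb, ha⟩
    · exact Or.inl ⟨ha, hb⟩
    · exact absurd (ha ▸ hb) (by decide)
  · rintro (⟨ha, hb⟩ | ⟨ha, hb⟩)
    · exact ⟨Or.inr ha, Or.inl hb⟩
    · exact ⟨Or.inl hb, Or.inr ha⟩

theorem checkGo_eq_none (cs : List Char) (i : Nat) (hi : 1 ≤ i)
    (h : ∀ j, i ≤ j → j < cs.length → ¬ pairAt cs (j-1)) : checkGo cs i = "-1 -1" := by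
  have key : ∀ n i, 1 ≤ i → cs.length - i ≤ n →
      (∀ j, i ≤ j → j < cs.length → ¬ pairAt cs (j-1)) → checkGo cs i = "-1 -1" := by
    intro n
    induction n with
    | zero =>
      intro i hi hn _
      rw [checkGo]
      simp only [dif_neg (by omega : ¬ i < cs.length)]
    | succ n ih =>
      intro i hi hn h
      rw [checkGo]
      by_cases hlt : i < cs.length
      · simp only [dif_pos hlt]
        have hfalse : ¬ pairAt cs (i-1) := h i le_rfl hlt
        rw [← test_iff cs i hlt hi] at hfalse
        simp only [Bool.not_eq_true] at hfalse
        simp only [hfalse]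
        exact ih (i+1) (by omega) (by omega) (fun j hj hjl => h j (by omega) hjl)
      · simp only [dif_neg hlt]
  exact key (cs.length - i) i hi le_rfl h

theorem checkGo_eq_found (cs : List Char) (i j : Nat) (hi : 1 ≤ i) (hij : i ≤ j)
    (hj : j < cs.length) (hok : pairAt cs (j-1))
    (hmin : ∀ k, i ≤ k → k < j → ¬ pairAt cs (k-1)) :
    checkGo cs i = PySem.Int.toStr (j : Int) ++ " " ++ PySem.Int.toStr ((j : Int) + 1) := by
  have key : ∀ n i, 1 ≤ i → i ≤ j → j - i ≤ n →
      (∀ k, i ≤ k → k < j → ¬ pairAt cs (k-1)) →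
      checkGo cs i = PySem.Int.toStr (j : Int) ++ " " ++ PySem.Int.toStr ((j : Int) + 1) := by
    intro n
    induction n with
    | zero =>
      intro i hi hij hn _
      have : i = j := by omega
      subst this
      rw [checkGo]
      simp only [dif_pos hj]
      rw [if_pos ((test_iff cs i hj hi).mpr hok)]
    | succ n ih =>
      intro i hi hij hn hmin
      by_cases heq : i = j
      · subst heq
        rw [checkGo]
        simp only [dif_pos hj]
        rw [if_pos ((test_iff cs i hj hi).mpr hok)]
      · have hlt : i < cs.length := by omega
        rw [checkGo]
        simp only [dif_pos hlt]
        have hfalse : ¬ pairAt cs (i-1) := hmin i le_rfl (by omega)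
        rw [← test_iff cs i hlt hi] at hfalse
        simp only [Bool.not_eq_true] at hfalse
        simp only [hfalse]
        exact ih (i+1) (by omega) (by omega) (by omega) (fun k hk hkl => hmin k (by omega) hkl)
  exact key (j - i) i hi hij le_rfl hmin

theorem infix_iff_drop (s sub : List Char) : sub <:+: s ↔ ∃ j, sub <+: s.drop j := by
  rw [← PySem.Chars.isIn_iff_infix, ← PySem.Chars.exists_prefix_drop_iff_isIn]

theorem find_le_of_prefix (s sub : List Char) (k : Nat) (h : sub <+: s.drop k) :
    0 ≤ PySem.Chars.find s sub ∧ PySem.Chars.find s sub ≤ (k : Int) := by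
  have h0 : 0 ≤ PySem.Chars.find s sub := by
    rw [PySem.Chars.find_nonneg_iff, infix_iff_drop]; exact ⟨k, h⟩
  refine ⟨h0, ?_⟩
  by_contra hlt
  push Not at hlt
  have hk : k < (PySem.Chars.find s sub).toNat := by omega
  exact (PySem.Chars.find_spec h0).2 k hk h

theorem main_eq (w : String) : check w = check_alt w := by
  set cs := w.toList with hcs
  letI : DecidablePred (pairAt cs) := fun p => by unfold pairAt; infer_instance
  have hab : ("ab" : String).toList = ['a','b'] := by decide
  have hba : ("ba" : String).toList = ['b','a'] := by decide
  by_cases hex : ∃ p, pairAt cs p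
  · -- a qualifying pair exists; m is its least position
    have hm := Nat.find_spec hex
    set m := Nat.find hex with hmdef
    have hlen : m + 1 < cs.length := by
      rcases hm with ⟨_, h2⟩ | ⟨_, h2⟩ <;> exact (List.getElem?_eq_some_iff.mp h2).1
    -- A side
    have hA : check w = PySem.Int.toStr ((m+1 : Nat) : Int) ++ " " ++ PySem.Int.toStr (((m+1 : Nat) : Int) + 1) := by
      unfold check
      rw [if_neg (by simp [PySem.Str.len_eq, ← hcs]; omega)]
      exact checkGo_eq_found cs 1 (m+1) le_rfl (by omega) hlen
        (by simpa using hm)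
        (fun k hk1 hk2 => by
          have := Nat.find_min hex (m := k - 1) (by omega)
          simpa using this)
    -- B side
    set fa := PySem.Chars.find cs ['a','b'] with hfa
    set fb := PySem.Chars.find cs ['b','a'] with hfb
    have hfa_pair : 0 ≤ fa → pairAt cs fa.toNat := fun h0 =>
      Or.inl ((prefix2_iff 'a' 'b' cs fa.toNat).mp (PySem.Chars.find_spec h0).1)
    have hfb_pair : 0 ≤ fb → pairAt cs fb.toNat := fun h0 =>
      Or.inr ((prefix2_iff 'b' 'a' cs fb.toNat).mp (PySem.Chars.find_spec h0).1)
    have hfa_ge : 0 ≤ fa → (m : Int) ≤ fa := fun h0 => by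
      have := Nat.find_min' hex (hfa_pair h0)
      omega
    have hfb_ge : 0 ≤ fb → (m : Int) ≤ fb := fun h0 => by
      have := Nat.find_min' hex (hfb_pair h0)
      omega
    have hfa_lb : -1 ≤ fa := PySem.Chars.neg_one_le_find cs ['a','b']
    have hfb_lb : -1 ≤ fb := PySem.Chars.neg_one_le_find cs ['b','a']
    have hle : (if fa = -1 then fb else if fb = -1 then fa else min fa fb) = (m : Int) := by
      rcases hm with ⟨h1, h2⟩ | ⟨h1, h2⟩
      · have := find_le_of_prefix cs ['a','b'] m ((prefix2_iff 'a' 'b' cs m).mpr ⟨h1, h2⟩)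
        rw [← hfa] at this
        rw [if_neg (by omega)]
        by_cases hb1 : fb = -1
        · rw [if_pos hb1]; have := hfa_ge this.1; omega
        · rw [if_neg hb1]
          have hga := hfa_ge this.1
          have hgb := hfb_ge (by omega)
          omega
      · have := find_le_of_prefix cs ['b','a'] m ((prefix2_iff 'b' 'a' cs m).mpr ⟨h1, h2⟩)
        rw [← hfb] at this
        by_cases ha1 : fa = -1
        · rw [if_pos ha1]; have := hfb_ge this.1; omega
        · rw [if_neg ha1, if_neg (by omega)]
          have hga := hfa_ge (by omega)
          have hgb := hfb_ge this.1
          omega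
    have hB : check_alt w = PySem.Int.toStr ((m : Int) + 1) ++ " " ++ PySem.Int.toStr ((m : Int) + 2) := by
      unfold check_alt
      simp only [PySem.Str.find_eq, hab, hba, ← hcs, ← hfa, ← hfb]
      rw [hle, if_neg (by omega)]
    rw [hA, hB]
    push_cast
    ring_nf
  · -- no qualifying pair anywhere
    push Not at hex
    have hnfa : PySem.Chars.find cs ['a','b'] = -1 := by
      rw [PySem.Chars.find_eq_neg_one_iff, infix_iff_drop]
      rintro ⟨j, hj⟩
      exact hex j ((prefix2_iff 'a' 'b' cs j).mp hj |> Or.inl)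
    have hnfb : PySem.Chars.find cs ['b','a'] = -1 := by
      rw [PySem.Chars.find_eq_neg_one_iff, infix_iff_drop]
      rintro ⟨j, hj⟩
      exact hex j ((prefix2_iff 'b' 'a' cs j).mp hj |> Or.inr)
    have hB : check_alt w = "-1 -1" := by
      unfold check_alt
      simp [PySem.Str.find_eq, hab, hba, ← hcs, hnfa, hnfb]
    rw [hB]
    unfold check
    by_cases hl : PySem.Str.len w = 1
    · rw [if_pos hl]
    · rw [if_neg hl]
      exact checkGo_eq_none cs 1 le_rfl (fun j _ hjl => hex (j-1))

-- ===== VERDICT (by name: the statement is the Claim_ definition above) =====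
theorem check_spec : Claim_equal_check := by
  intro w _
  unfold Spec_check
  exact main_eq w
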